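-- pv_equiv track=rewrite | github.com/kazimc4n/My_Notes | Movie/PART2b.py | get_the_solution_C1
-- ===== SOURCE A (Python) =====
-- def get_the_solution_C1(num_of_chars, num_of_subgroups, num_seats_in_a_slot, seat_config):
--     chars_per_subgroup = num_of_chars // num_of_subgroups
--     available_seats = 0
--     new_seat_config = []
--
--     seat_slots = seat_config.split("|")
-- #for slot
--     for slot in seat_slots:
--         slot_available_seats = slot.count("O") // chars_per_subgroup
--         available_seats += slot_available_seats
--         new_slot = slot.replace("O", "S", slot_available_seats * chars_per_subgroup)
--         new_seat_config.append(new_slot)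
-- # conditions
--     if available_seats >= num_of_subgroups:
--         return "|".join(new_seat_config)
--     else:
--         return "X"
-- ===== SOURCE B (Python) =====
-- def get_the_solution_C1(num_of_chars, num_of_subgroups, num_seats_in_a_slot, seat_config):
--     cps = num_of_chars // num_of_subgroups
--     # pass 1: one character scan computing the per-slot available-group counts
--     counts = []
--     o = 0
--     for ch in seat_config:
--         if ch == '|':
--             counts.append(o // cps)
--             o = 0
--         elif ch == 'O':
--             o += 1
--     counts.append(o // cps)
--     if sum(counts) < num_of_subgroups:
--         return "X"
--     # pass 2: one character scan emitting the result, spending each slot's budget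
--     out = []
--     i = 0
--     rem = counts[0] * cps
--     for ch in seat_config:
--         if ch == '|':
--             i += 1
--             rem = counts[i] * cps
--             out.append('|')
--         elif ch == 'O' and rem > 0:
--             out.append('S')
--             rem -= 1
--         else:
--             out.append(ch)
--     return ''.join(out)
-- ===== Notes on version B (the rewrite author's own statement) =====
-- stated objective: alternative
-- what changed: Replaces A's split/count/replace/join string-method pipeline with two plain character-level scans: the first streams over the characters accumulating per-slot 'O' counts at '|' boundaries, the second streams again emitting 'S' while a per-slot replacement budget lasts, so no intermediate slot strings are ever built.
import Mathlib
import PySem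

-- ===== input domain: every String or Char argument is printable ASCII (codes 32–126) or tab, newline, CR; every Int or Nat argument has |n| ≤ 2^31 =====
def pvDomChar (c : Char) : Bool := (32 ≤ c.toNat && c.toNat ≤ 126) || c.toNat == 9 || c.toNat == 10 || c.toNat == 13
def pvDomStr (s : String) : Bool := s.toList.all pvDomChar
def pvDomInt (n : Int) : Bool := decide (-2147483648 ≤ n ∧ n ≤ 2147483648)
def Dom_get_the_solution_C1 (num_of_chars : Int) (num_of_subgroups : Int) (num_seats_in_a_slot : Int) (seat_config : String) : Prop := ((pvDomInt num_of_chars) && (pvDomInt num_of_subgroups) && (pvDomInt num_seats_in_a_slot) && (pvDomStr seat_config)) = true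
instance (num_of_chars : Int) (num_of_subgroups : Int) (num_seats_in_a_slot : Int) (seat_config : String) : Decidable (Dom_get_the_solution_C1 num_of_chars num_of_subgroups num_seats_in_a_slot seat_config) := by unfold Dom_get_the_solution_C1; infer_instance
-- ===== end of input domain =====

-- B replaces A's split/count/replace/join string pipeline by two plain character scans
-- (count per-slot budgets, then emit spending them); objective: alternative.

-- ===== PORT A =====
-- hand port of slot.replace("O", "S", n) for the single characters 'O'/'S':
-- exact Python semantics — n = 0 stops, negative n replaces all occurrences.
def pvReplOS : List Char → Int → List Char
  | [], _ => []
  | c :: rest, n =>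
      if c = 'O' then
        if n = 0 then c :: rest else 'S' :: pvReplOS rest (n - 1)
      else c :: pvReplOS rest n

def get_the_solution_C1 (num_of_chars : Int) (num_of_subgroups : Int) (num_seats_in_a_slot : Int) (seat_config : String) : String :=
  let chars_per_subgroup := PySem.Int.floordiv num_of_chars num_of_subgroups
  let seat_slots := (PySem.Str.split? seat_config "|").getD []
  let r := seat_slots.foldl
    (fun (st : Int × List String) slot =>
      let slot_available_seats := PySem.Int.floordiv (PySem.Str.count slot "O" : Int) chars_per_subgroup
      let new_slot := String.ofList (pvReplOS slot.toList (slot_available_seats * chars_per_subgroup))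
      (st.1 + slot_available_seats, st.2 ++ [new_slot]))
    (0, [])
  if r.1 ≥ num_of_subgroups then PySem.Str.join "|" r.2 else "X"

-- ===== PORT B =====
-- pass 1: character scan collecting each slot's available-group count at '|' boundaries
def pvCountsB (cps : Int) : List Char → Int → List Int
  | [], o => [PySem.Int.floordiv o cps]
  | a :: rest, o =>
      if a = '|' then PySem.Int.floordiv o cps :: pvCountsB cps rest 0
      else pvCountsB cps rest (if a = 'O' then o + 1 else o)

-- pass 2: character scan emitting the output, spending the current slot's budget
-- (the Python walks counts by index i; the port consumes the same list from the front)
def pvEmitB (cps : Int) : List Char → Int → List Int → List Char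
  | [], _, _ => []
  | a :: rest, rem, ks =>
      if a = '|' then '|' :: pvEmitB cps rest (ks.headD 0 * cps) ks.tail
      else if a = 'O' ∧ 0 < rem then 'S' :: pvEmitB cps rest (rem - 1) ks
      else a :: pvEmitB cps rest rem ks

def get_the_solution_C1_alt (num_of_chars : Int) (num_of_subgroups : Int) (num_seats_in_a_slot : Int) (seat_config : String) : String :=
  let cps := PySem.Int.floordiv num_of_chars num_of_subgroups
  let counts := pvCountsB cps seat_config.toList 0
  if counts.sum < num_of_subgroups then "X"
  else String.ofList (pvEmitB cps seat_config.toList (counts.headD 0 * cps) counts.tail)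

-- ===== PRECONDITION & SPEC =====
-- A raises ZeroDivisionError exactly when num_of_subgroups = 0 or num_of_chars // num_of_subgroups = 0.
def Pre_get_the_solution_C1 (num_of_chars : Int) (num_of_subgroups : Int) (num_seats_in_a_slot : Int) (seat_config : String) : Prop :=
  num_of_subgroups ≠ 0 ∧ PySem.Int.floordiv num_of_chars num_of_subgroups ≠ 0
instance (num_of_chars : Int) (num_of_subgroups : Int) (num_seats_in_a_slot : Int) (seat_config : String) : Decidable (Pre_get_the_solution_C1 num_of_chars num_of_subgroups num_seats_in_a_slot seat_config) := by unfold Pre_get_the_solution_C1; infer_instance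
def pvWitness_get_the_solution_C1 : Int × Int × Int × String := (4, 2, 2, "OOSO|OOOO")

def Spec_get_the_solution_C1 (num_of_chars : Int) (num_of_subgroups : Int) (num_seats_in_a_slot : Int) (seat_config : String) (out : String) : Prop := out = get_the_solution_C1_alt num_of_chars num_of_subgroups num_seats_in_a_slot seat_config
instance (num_of_chars : Int) (num_of_subgroups : Int) (num_seats_in_a_slot : Int) (seat_config : String) (out : String) : Decidable (Spec_get_the_solution_C1 num_of_chars num_of_subgroups num_seats_in_a_slot seat_config out) := by unfold Spec_get_the_solution_C1; infer_instance

-- ===== CLAIM (what is proved, stated in full; the proofs are below) =====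
def Claim_equal_get_the_solution_C1 : Prop := ∀ (num_of_chars : Int) (num_of_subgroups : Int) (num_seats_in_a_slot : Int) (seat_config : String), Dom_get_the_solution_C1 num_of_chars num_of_subgroups num_seats_in_a_slot seat_config → Pre_get_the_solution_C1 num_of_chars num_of_subgroups num_seats_in_a_slot seat_config → Spec_get_the_solution_C1 num_of_chars num_of_subgroups num_seats_in_a_slot seat_config (get_the_solution_C1 num_of_chars num_of_subgroups num_seats_in_a_slot seat_config)

-- ===== LEMMAS AND PROOFS =====

-- splitting a char list on '|' (proof-side reference shape, nonempty by construction)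
def pvSplitC : List Char → List (List Char)
  | [] => [[]]
  | a :: rest =>
      if a = '|' then [] :: pvSplitC rest
      else (a :: (pvSplitC rest).headD []) :: (pvSplitC rest).tail

theorem pvSplitC_ne_nil (l : List Char) : pvSplitC l ≠ [] := by
  cases l with
  | nil => simp [pvSplitC]
  | cons a rest => unfold pvSplitC; split_ifs <;> simp

theorem pv_splitOn_go_char (fuel : Nat) : ∀ (l cur : List Char) (acc : List (List Char)),
    l.length ≤ fuel →
    PySem.Chars.splitOn.go ['|'] fuel l cur acc
      = acc.reverse ++ ((cur.reverse ++ (pvSplitC l).headD []) :: (pvSplitC l).tail) := by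
  induction fuel with
  | zero =>
      intro l cur acc h
      have : l = [] := List.eq_nil_of_length_eq_zero (Nat.le_zero.mp h)
      subst this
      simp [PySem.Chars.splitOn.go, pvSplitC]
  | succ f ih =>
      intro l cur acc h
      cases l with
      | nil => simp [PySem.Chars.splitOn.go, pvSplitC]
      | cons a rest =>
          simp only [PySem.Chars.splitOn.go]
          by_cases ha : a = '|'
          · subst ha
            have hpre : List.isPrefixOf ['|'] ('|' :: rest) = true := by
              simp [List.isPrefixOf]
            rw [if_pos hpre]
            simp only [List.length_cons] at h
            rw [ih _ _ _ (by simpa using h)]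
            obtain ⟨s, ss, hs⟩ := List.exists_cons_of_ne_nil (pvSplitC_ne_nil rest)
            simp [pvSplitC, hs]
          · have hpre : List.isPrefixOf ['|'] (a :: rest) = false := by
              simp [List.isPrefixOf, Ne.symm ha]
            rw [if_neg (by simp [hpre])]
            simp only [List.length_cons] at h
            rw [ih _ _ _ (by omega)]
            simp [pvSplitC, ha, List.append_assoc]

theorem pv_splitOn_char (l : List Char) : PySem.Chars.splitOn l ['|'] = pvSplitC l := by
  unfold PySem.Chars.splitOn
  rw [pv_splitOn_go_char (l.length + 1) l [] [] (by omega)]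
  obtain ⟨s, ss, hs⟩ := List.exists_cons_of_ne_nil (pvSplitC_ne_nil l)
  simp [hs]

theorem pv_count_go_char (fuel : Nat) : ∀ (l : List Char) (acc : Nat),
    l.length ≤ fuel →
    PySem.Chars.count.go ['O'] fuel l acc = acc + l.count 'O' := by
  induction fuel with
  | zero =>
      intro l acc h
      have : l = [] := List.eq_nil_of_length_eq_zero (Nat.le_zero.mp h)
      subst this; simp [PySem.Chars.count.go]
  | succ f ih =>
      intro l acc h
      cases l with
      | nil => simp [PySem.Chars.count.go]
      | cons a rest =>
          simp only [PySem.Chars.count.go]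
          simp only [List.length_cons] at h
          by_cases ha : a = 'O'
          · subst ha
            have hpre : List.isPrefixOf ['O'] ('O' :: rest) = true := by
              simp [List.isPrefixOf]
            rw [if_pos hpre]
            rw [ih _ _ (by simpa using h)]
            simp [List.count_cons]
            omega
          · have hpre : List.isPrefixOf ['O'] (a :: rest) = false := by
              simp [List.isPrefixOf, Ne.symm ha]
            rw [if_neg (by simp [hpre])]
            rw [ih _ _ (by omega)]
            simp [List.count_cons, ha]

theorem pv_count_char (l : List Char) : PySem.Chars.count l ['O'] = l.count 'O' := by
  unfold PySem.Chars.count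
  simp [pv_count_go_char l.length l 0 le_rfl]

-- per-slot available-group count on the char-list side
def pvF (cps : Int) (s : List Char) : Int := PySem.Int.floordiv ((s.count 'O' : Nat) : Int) cps

theorem pvCountsB_eq (cps : Int) : ∀ (l : List Char) (o : Int),
    pvCountsB cps l o
      = PySem.Int.floordiv (o + (((pvSplitC l).headD []).count 'O' : Int)) cps
        :: (pvSplitC l).tail.map (pvF cps) := by
  intro l
  induction l with
  | nil => intro o; simp [pvCountsB, pvSplitC]
  | cons a rest ih =>
      intro o
      by_cases ha : a = '|'
      · subst ha
        simp only [pvCountsB, pvSplitC, if_pos rfl]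
        rw [ih 0]
        obtain ⟨s, ss, hs⟩ := List.exists_cons_of_ne_nil (pvSplitC_ne_nil rest)
        simp [hs, pvF]
      · simp only [pvCountsB, pvSplitC, if_neg ha]
        rw [ih]
        obtain ⟨s, ss, hs⟩ := List.exists_cons_of_ne_nil (pvSplitC_ne_nil rest)
        by_cases hO : a = 'O'
        · subst hO
          simp [hs, List.count_cons]
          ring_nf
        · simp [hs, List.count_cons, hO, ha]

theorem pvReplOS_zero (s : List Char) : pvReplOS s 0 = s := by
  induction s with
  | nil => rfl
  | cons c rest ih => unfold pvReplOS; split_ifs with h1 h2 <;> simp [ih] <;> omega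

-- the tail part of B's emitting scan, slot by slot
def pvEmitTail (cps : Int) : List (List Char) → List Int → List Char
  | [], _ => []
  | s :: ss, ks => '|' :: (pvReplOS s (ks.headD 0 * cps) ++ pvEmitTail cps ss ks.tail)

theorem pvEmitB_eq (cps : Int) : ∀ (l : List Char) (rem : Int) (ks : List Int),
    0 ≤ rem → (∀ k ∈ ks, 0 ≤ k * cps) →
    pvEmitB cps l rem ks
      = pvReplOS ((pvSplitC l).headD []) rem ++ pvEmitTail cps (pvSplitC l).tail ks := by
  intro l
  induction l with
  | nil => intro rem ks _ _; simp [pvEmitB, pvSplitC, pvReplOS, pvEmitTail]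
  | cons a rest ih =>
      intro rem ks hrem hks
      by_cases ha : a = '|'
      · subst ha
        simp only [pvEmitB, pvSplitC, if_pos rfl]
        have h0 : 0 ≤ ks.headD 0 * cps := by
          cases ks with
          | nil => simp
          | cons k ks' => exact hks k (by simp)
        have h1 : ∀ k ∈ ks.tail, 0 ≤ k * cps := fun k hk => hks k (List.mem_of_mem_tail hk)
        rw [ih _ _ h0 h1]
        obtain ⟨s, ss, hs⟩ := List.exists_cons_of_ne_nil (pvSplitC_ne_nil rest)
        simp [hs, pvEmitTail, pvReplOS]
      · simp only [pvEmitB, pvSplitC, if_neg ha]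
        obtain ⟨s, ss, hs⟩ := List.exists_cons_of_ne_nil (pvSplitC_ne_nil rest)
        by_cases hO : a = 'O'
        · subst hO
          by_cases hr : 0 < rem
          · rw [if_pos ⟨rfl, hr⟩]
            rw [ih _ _ (by omega) hks]
            simp [hs, pvReplOS, show ¬ rem = 0 by omega]
          · have hr0 : rem = 0 := by omega
            subst hr0
            rw [if_neg (by simp)]
            rw [ih _ _ le_rfl hks]
            simp [hs, pvReplOS, pvReplOS_zero]
        · rw [if_neg (by simp [hO])]
          rw [ih _ _ hrem hks]
          simp [hs, pvReplOS, hO]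

-- A's fold accumulates exactly the sum of the per-slot counts and the map of rebuilt slots.
theorem pv_fold_char (cps : Int) (slots : List String) (a : Int) (l : List String) :
    slots.foldl
      (fun (st : Int × List String) slot =>
        let k := PySem.Int.floordiv (PySem.Str.count slot "O" : Int) cps
        let new_slot := String.ofList (pvReplOS slot.toList (k * cps))
        (st.1 + k, st.2 ++ [new_slot]))
      (a, l)
    = (a + (slots.map (fun slot => PySem.Int.floordiv (PySem.Str.count slot "O" : Int) cps)).sum,
       l ++ slots.map (fun slot =>
         String.ofList (pvReplOS slot.toList
           (PySem.Int.floordiv (PySem.Str.count slot "O" : Int) cps * cps)))) := by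
  induction slots generalizing a l with
  | nil => simp
  | cons s rest ih =>
      simp only [List.foldl_cons, List.map_cons, List.sum_cons]
      rw [ih]
      simp [add_assoc]

-- nonnegativity of each slot's replacement budget (count//cps)*cps, for any cps ≠ 0
theorem pv_budget_nonneg (n cps : Int) (hn : 0 ≤ n) (hc : cps ≠ 0) :
    0 ≤ PySem.Int.floordiv n cps * cps := by
  rcases lt_or_gt_of_ne hc with hneg | hpos
  · have h := PySem.Int.mod_neg_bounds n hneg
    have h2 := PySem.Int.floordiv_mul_add_mod n cps
    omega
  · have h0 : 0 ≤ PySem.Int.floordiv n cps := by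
      rw [PySem.Int.floordiv_eq_ediv_of_pos hpos]
      exact Int.ediv_nonneg hn (le_of_lt hpos)
    positivity

theorem pv_intercalate_flat (xs : List (List Char)) (x : List Char) :
    List.intercalate ['|'] (x :: xs) = x ++ xs.flatMap (fun s => '|' :: s) := by
  induction xs generalizing x with
  | nil => simp [List.intercalate]
  | cons y ys ih =>
      have := ih y
      simp only [List.intercalate] at *
      simp [List.intersperse, this]

theorem pvEmitTail_map (cps : Int) (ss : List (List Char)) :
    pvEmitTail cps ss (ss.map (pvF cps))
      = ss.flatMap (fun s => '|' :: pvReplOS s (pvF cps s * cps)) := by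
  induction ss with
  | nil => rfl
  | cons s rest ih => simp [pvEmitTail, ih]

-- ===== VERDICT (by name: the statement is the Claim_ definition above) =====
theorem get_the_solution_C1_spec : Claim_equal_get_the_solution_C1 := by
  intro nc ns nss sc _ hpre
  obtain ⟨hns, hcps⟩ := hpre
  unfold Spec_get_the_solution_C1 get_the_solution_C1 get_the_solution_C1_alt
  simp only
  set cps := PySem.Int.floordiv nc ns with hcpsdef
  -- identify A's slot list with pvSplitC
  have hsplit : (PySem.Str.split? sc "|").getD [] = (pvSplitC sc.toList).map String.ofList := by
    simp [PySem.Str.split?, PySem.Chars.split?, pv_splitOn_char]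
  rw [hsplit, pv_fold_char]
  obtain ⟨s, ss, hs⟩ := List.exists_cons_of_ne_nil (pvSplitC_ne_nil sc.toList)
  rw [hs]
  simp only [List.map_map, List.map_cons, List.sum_cons, List.nil_append, zero_add, ge_iff_le]
  -- per-slot count on strings = pvF on char lists
  have hcnt : ∀ t : List Char,
      PySem.Int.floordiv (PySem.Str.count (String.ofList t) "O" : Int) cps = pvF cps t := by
    intro t
    simp [PySem.Str.count, pvF, pv_count_char]
  have hm1 : List.map ((fun slot => PySem.Int.floordiv (PySem.Str.count slot "O" : Int) cps) ∘ String.ofList) ss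
      = ss.map (pvF cps) := List.map_congr_left (fun t _ => hcnt t)
  have hm2 : List.map ((fun slot => String.ofList (pvReplOS slot.toList (PySem.Int.floordiv (PySem.Str.count slot "O" : Int) cps * cps))) ∘ String.ofList) ss
      = ss.map (fun t => String.ofList (pvReplOS t (pvF cps t * cps))) := by
    refine List.map_congr_left (fun t _ => ?_)
    have h1 : (String.ofList t).toList = t := by simp
    simp only [Function.comp_apply, h1, hcnt t]
  have hhead1 : (String.ofList s).toList = s := by simp
  rw [hm1, hm2, hhead1, hcnt s]
  -- B's count list
  have hcounts : pvCountsB cps sc.toList 0 = pvF cps s :: ss.map (pvF cps) := by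
    rw [pvCountsB_eq, hs]
    simp [pvF]
  rw [hcounts]
  simp only [List.sum_cons, List.headD_cons, List.tail_cons]
  by_cases hge : ns ≤ pvF cps s + (ss.map (pvF cps)).sum
  · rw [if_pos hge, if_neg (by omega)]
    -- both sides build the replaced configuration; compare the char lists
    have hbudget : ∀ k ∈ ss.map (pvF cps), 0 ≤ k * cps := by
      intro k hk
      obtain ⟨t, _, rfl⟩ := List.mem_map.mp hk
      exact pv_budget_nonneg _ _ (by positivity) hcps
    have hhead : 0 ≤ pvF cps s * cps := pv_budget_nonneg _ _ (by positivity) hcps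
    have hemit := pvEmitB_eq cps sc.toList (pvF cps s * cps) (ss.map (pvF cps)) hhead hbudget
    rw [hs] at hemit
    simp only [List.headD_cons, List.tail_cons] at hemit
    rw [hemit, pvEmitTail_map]
    simp only [PySem.Str.join, PySem.Chars.join]
    congr 1
    have hsep : "|".toList = ['|'] := rfl
    have hmapl : List.map String.toList
        (String.ofList (pvReplOS s (pvF cps s * cps))
          :: ss.map (fun t => String.ofList (pvReplOS t (pvF cps t * cps))))
        = pvReplOS s (pvF cps s * cps) :: ss.map (fun t => pvReplOS t (pvF cps t * cps)) := by
      simp [List.map_map, Function.comp_def]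
    rw [hsep, hmapl, pv_intercalate_flat]
    congr 1
    simp [List.flatMap_map]
  · rw [if_neg (by omega), if_pos (by omega)]
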